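-- pv_equiv track=rewrite | github.com/veselopoem/DPOdz | main.py | CalcHist
-- ===== SOURCE A (Python) =====
-- def CalcHist(x):
--     hist = [0]*10
--     for i in x:
--         if i<100:
--             hist[0]+=1
--         elif i>=100 and i<200:
--              hist[1]+=1
--         elif i>=200 and i<300:
--              hist[2]+=1
--         elif i>=300 and i<400:
--              hist[3]+=1
--         elif i>=400 and i<500:
--              hist[4]+=1
--         elif i>=500 and i<600:
--              hist[5]+=1
--         elif i>=600 and i<700:
--              hist[6]+=1
--         elif i>=700 and i<800:
--              hist[7]+=1
--         elif i>=800 and i<900: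
--              hist[8]+=1
--         else:
--              hist[9]+=1
--     return hist
-- ===== SOURCE B (Python) =====
-- def CalcHist(x):
--     # Cumulative-distribution approach: count how many values lie below each
--     # threshold (ten counting passes), then take finite differences.
--     def below(b):
--         n = 0
--         for v in x:
--             if v < b:
--                 n += 1
--         return n
--     cum = [below(100 * k) for k in range(1, 10)] + [len(x)]
--     hist = []
--     prev = 0
--     for c in cum:
--         hist.append(c - prev)
--         prev = c
--     return hist
-- ===== Notes on version B (the rewrite author's own statement) =====
-- stated objective: alternative
-- what changed: Replaces the single-pass ten-branch binning loop with a cumulative-distribution algorithm: ten counting passes give the number of values below each 100-boundary, and a final differencing scan turns the cumulative counts into the histogram.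
import Mathlib
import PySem

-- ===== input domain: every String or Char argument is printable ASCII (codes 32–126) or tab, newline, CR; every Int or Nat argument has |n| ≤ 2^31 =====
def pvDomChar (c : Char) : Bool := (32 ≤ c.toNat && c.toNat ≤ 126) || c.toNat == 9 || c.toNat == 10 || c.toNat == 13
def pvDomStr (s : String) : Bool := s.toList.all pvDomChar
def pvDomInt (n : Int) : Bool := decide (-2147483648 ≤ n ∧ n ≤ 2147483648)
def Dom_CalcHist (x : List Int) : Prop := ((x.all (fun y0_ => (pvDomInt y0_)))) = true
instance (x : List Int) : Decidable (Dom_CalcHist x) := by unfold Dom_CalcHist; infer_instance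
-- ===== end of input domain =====

-- B replaces A's single-pass ten-branch binning loop with a cumulative-distribution
-- algorithm: ten counting passes (values below each 100-boundary), then finite differences.

-- ===== PORT A =====
-- hist[k] += 1 for a literal in-range index k
def pvInc (hist : List Int) (k : Nat) : List Int :=
  hist.set k (hist.getD k 0 + 1)

-- one loop iteration of A: the elif ladder, each branch incrementing a fixed slot
def pvStepA (hist : List Int) (i : Int) : List Int :=
  if i < 100 then pvInc hist 0
  else if 100 ≤ i ∧ i < 200 then pvInc hist 1
  else if 200 ≤ i ∧ i < 300 then pvInc hist 2
  else if 300 ≤ i ∧ i < 400 then pvInc hist 3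
  else if 400 ≤ i ∧ i < 500 then pvInc hist 4
  else if 500 ≤ i ∧ i < 600 then pvInc hist 5
  else if 600 ≤ i ∧ i < 700 then pvInc hist 6
  else if 700 ≤ i ∧ i < 800 then pvInc hist 7
  else if 800 ≤ i ∧ i < 900 then pvInc hist 8
  else pvInc hist 9

def CalcHist (x : List Int) : List Int :=
  x.foldl pvStepA [0, 0, 0, 0, 0, 0, 0, 0, 0, 0]

-- ===== PORT B =====
-- helper below(b): one counting pass over x
def pvBelow (x : List Int) (b : Int) : Int :=
  x.foldl (fun n v => if v < b then n + 1 else n) 0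

def CalcHist_alt (x : List Int) : List Int :=
  let cum := (PySem.List.pyRange 1 10 1).map (fun k => pvBelow x (100 * k)) ++ [(x.length : Int)]
  (cum.foldl (fun (st : List Int × Int) c => (st.1 ++ [c - st.2], c)) ([], 0)).1

-- ===== PRECONDITION & SPEC =====
def Spec_CalcHist (x : List Int) (out : List Int) : Prop := out = CalcHist_alt x
instance (x : List Int) (out : List Int) : Decidable (Spec_CalcHist x out) := by unfold Spec_CalcHist; infer_instance

-- ===== CLAIM (what is proved, stated in full; the proofs are below) =====
def Claim_equal_CalcHist : Prop := ∀ (x : List Int), Dom_CalcHist x → Spec_CalcHist x (CalcHist x)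

-- ===== LEMMAS AND PROOFS =====

theorem pvBelow_shift (b : Int) (t : List Int) : ∀ a : Int,
    t.foldl (fun n v => if v < b then n + 1 else n) a
      = a + t.foldl (fun n v => if v < b then n + 1 else n) 0 := by
  induction t with
  | nil => intro a; simp
  | cons h t ih =>
      intro a
      simp only [List.foldl]
      rw [ih, ih (if h < b then (0:Int) + 1 else 0)]
      split_ifs <;> omega

theorem pvBelow_cons (i : Int) (t : List Int) (b : Int) :
    pvBelow (i :: t) b = (if i < b then 1 else 0) + pvBelow t b := by
  simp only [pvBelow, List.foldl]
  rw [pvBelow_shift]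
  split_ifs <;> omega

theorem pvInc_0 (a0 a1 a2 a3 a4 a5 a6 a7 a8 a9 : Int) :
    pvInc [a0, a1, a2, a3, a4, a5, a6, a7, a8, a9] 0 = [a0 + 1, a1, a2, a3, a4, a5, a6, a7, a8, a9] := rfl

theorem pvInc_1 (a0 a1 a2 a3 a4 a5 a6 a7 a8 a9 : Int) :
    pvInc [a0, a1, a2, a3, a4, a5, a6, a7, a8, a9] 1 = [a0, a1 + 1, a2, a3, a4, a5, a6, a7, a8, a9] := rfl

theorem pvInc_2 (a0 a1 a2 a3 a4 a5 a6 a7 a8 a9 : Int) :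
    pvInc [a0, a1, a2, a3, a4, a5, a6, a7, a8, a9] 2 = [a0, a1, a2 + 1, a3, a4, a5, a6, a7, a8, a9] := rfl

theorem pvInc_3 (a0 a1 a2 a3 a4 a5 a6 a7 a8 a9 : Int) :
    pvInc [a0, a1, a2, a3, a4, a5, a6, a7, a8, a9] 3 = [a0, a1, a2, a3 + 1, a4, a5, a6, a7, a8, a9] := rfl

theorem pvInc_4 (a0 a1 a2 a3 a4 a5 a6 a7 a8 a9 : Int) :
    pvInc [a0, a1, a2, a3, a4, a5, a6, a7, a8, a9] 4 = [a0, a1, a2, a3, a4 + 1, a5, a6, a7, a8, a9] := rfl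

theorem pvInc_5 (a0 a1 a2 a3 a4 a5 a6 a7 a8 a9 : Int) :
    pvInc [a0, a1, a2, a3, a4, a5, a6, a7, a8, a9] 5 = [a0, a1, a2, a3, a4, a5 + 1, a6, a7, a8, a9] := rfl

theorem pvInc_6 (a0 a1 a2 a3 a4 a5 a6 a7 a8 a9 : Int) :
    pvInc [a0, a1, a2, a3, a4, a5, a6, a7, a8, a9] 6 = [a0, a1, a2, a3, a4, a5, a6 + 1, a7, a8, a9] := rfl

theorem pvInc_7 (a0 a1 a2 a3 a4 a5 a6 a7 a8 a9 : Int) :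
    pvInc [a0, a1, a2, a3, a4, a5, a6, a7, a8, a9] 7 = [a0, a1, a2, a3, a4, a5, a6, a7 + 1, a8, a9] := rfl

theorem pvInc_8 (a0 a1 a2 a3 a4 a5 a6 a7 a8 a9 : Int) :
    pvInc [a0, a1, a2, a3, a4, a5, a6, a7, a8, a9] 8 = [a0, a1, a2, a3, a4, a5, a6, a7, a8 + 1, a9] := rfl

theorem pvInc_9 (a0 a1 a2 a3 a4 a5 a6 a7 a8 a9 : Int) :
    pvInc [a0, a1, a2, a3, a4, a5, a6, a7, a8, a9] 9 = [a0, a1, a2, a3, a4, a5, a6, a7, a8, a9 + 1] := rfl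

-- the main invariant: A's fold from an arbitrary 10-slot accumulator
theorem pvFoldA (x : List Int) : ∀ a0 a1 a2 a3 a4 a5 a6 a7 a8 a9 : Int,
    x.foldl pvStepA [a0, a1, a2, a3, a4, a5, a6, a7, a8, a9] =
      [a0 + pvBelow x 100,
       a1 + (pvBelow x 200 - pvBelow x 100),
       a2 + (pvBelow x 300 - pvBelow x 200),
       a3 + (pvBelow x 400 - pvBelow x 300),
       a4 + (pvBelow x 500 - pvBelow x 400),
       a5 + (pvBelow x 600 - pvBelow x 500),
       a6 + (pvBelow x 700 - pvBelow x 600),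
       a7 + (pvBelow x 800 - pvBelow x 700),
       a8 + (pvBelow x 900 - pvBelow x 800),
       a9 + ((x.length : Int) - pvBelow x 900)] := by
  induction x with
  | nil => intro a0 a1 a2 a3 a4 a5 a6 a7 a8 a9; simp [pvBelow]
  | cons i t ih =>
      intro a0 a1 a2 a3 a4 a5 a6 a7 a8 a9
      simp only [List.foldl, pvStepA]
      split_ifs with h1 h2 h3 h4 h5 h6 h7 h8 h9 <;>
        simp only [pvInc_0, pvInc_1, pvInc_2, pvInc_3, pvInc_4, pvInc_5, pvInc_6, pvInc_7,
          pvInc_8, pvInc_9, ih, pvBelow_cons, List.length_cons, List.cons.injEq, and_true] <;>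
        push_cast <;> omega

-- ===== VERDICT (by name: the statement is the Claim_ definition above) =====
theorem CalcHist_spec : Claim_equal_CalcHist := by
  intro x _
  unfold Spec_CalcHist CalcHist CalcHist_alt
  rw [pvFoldA, show PySem.List.pyRange 1 10 1 = [1, 2, 3, 4, 5, 6, 7, 8, 9] from by decide]
  norm_num [List.foldl]
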